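-- pv_equiv track=rewrite | github.com/yhejazi/mtg-web-scraper | helper.py | getSuperType
-- ===== SOURCE A (Python) =====
-- def getSuperType(cardType, superType):
--     supertypes = ['Basic', 'Host', 'Legendary', 'Ongoing', 'Snow', 'World']
--     if any(supertype in cardType for supertype in supertypes):
--         typeSplit = cardType.split()
--         superType = (superType + ' ' + typeSplit[0]).strip()
--         cardType = ' '.join(typeSplit[1:])
--         cardType, superType = getSuperType(cardType, superType)
--     return cardType, superType
-- ===== SOURCE B (Python) =====
-- def getSuperType(cardType, superType):
--     # One split + one right-to-left scan instead of repeated split/join rounds: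
--     # every word up to (and including) the LAST word containing a supertype
--     # substring is moved into superType in one go.
--     supertypes = ('Basic', 'Host', 'Legendary', 'Ongoing', 'Snow', 'World')
--     words = cardType.split()
--     last = -1
--     for i, w in enumerate(words):
--         if any(s in w for s in supertypes):
--             last = i
--     if last >= 0:
--         superType = (superType + ' ' + ' '.join(words[:last + 1])).strip()
--         cardType = ' '.join(words[last + 1:])
--     return cardType, superType
-- ===== Notes on version B (the rewrite author's own statement) =====
-- stated objective: faster
-- what changed: Replaces A's repeated split/strip/join recursion (one word per round) with a single split followed by one scan that finds the last word containing a supertype substring, then builds both output strings with one join each.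
import Mathlib
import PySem

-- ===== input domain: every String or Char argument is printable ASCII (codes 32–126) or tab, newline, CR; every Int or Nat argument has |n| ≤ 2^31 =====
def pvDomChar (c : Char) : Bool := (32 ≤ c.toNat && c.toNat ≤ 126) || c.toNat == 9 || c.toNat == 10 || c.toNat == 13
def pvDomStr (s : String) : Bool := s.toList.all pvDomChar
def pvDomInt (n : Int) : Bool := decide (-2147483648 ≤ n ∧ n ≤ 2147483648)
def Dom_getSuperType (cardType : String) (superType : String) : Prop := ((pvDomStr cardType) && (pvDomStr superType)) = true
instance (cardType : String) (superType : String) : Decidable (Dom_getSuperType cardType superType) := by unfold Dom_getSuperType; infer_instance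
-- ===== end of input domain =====

-- B replaces A's one-word-per-round split/strip/join recursion by a single split,
-- one scan for the last supertype-bearing word, and one join each (objective: faster).

-- ===== PORT A =====
-- A-side helpers: termination of A's recursion needs the word count of the remaining
-- string to drop each round; `pwords` is a structural model of str.split() used only
-- to prove that (the port cites `getSuperTypeAux_dec` by name in `decreasing_by`).

-- structural version of Python's str.split() (no separator)
def pwords : List Char → List (List Char)
  | [] => []
  | c :: cs =>
    if PySem.Chars.isspace c then pwords cs
    else (c :: cs.takeWhile (fun d => !PySem.Chars.isspace d)) ::
         pwords (cs.dropWhile (fun d => !PySem.Chars.isspace d))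
termination_by s => s.length
decreasing_by
  · simp
  · have := List.length_dropWhile_le (fun d => !PySem.Chars.isspace d) cs; simp; omega

theorem split₀_go_eq (s : List Char) : ∀ (cur : List Char) (acc : List (List Char)),
    PySem.Chars.split₀.go s cur acc =
      acc.reverse ++ (if cur.isEmpty then pwords s
        else (cur.reverse ++ s.takeWhile (fun d => !PySem.Chars.isspace d)) ::
             pwords (s.dropWhile (fun d => !PySem.Chars.isspace d))) := by
  induction s with
  | nil =>
    intro cur acc
    rw [PySem.Chars.split₀.go.eq_def]
    cases cur <;> simp [pwords]
  | cons c rest ih =>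
    intro cur acc
    rw [PySem.Chars.split₀.go.eq_def]
    by_cases hc : PySem.Chars.isspace c
    · cases cur with
      | nil => simp [hc, ih, pwords]
      | cons x xs => simp [hc, ih, pwords]
    · have hc' : PySem.Chars.isspace c = false := by simpa using hc
      cases cur with
      | nil => simp [hc', ih, pwords]
      | cons x xs => simp [hc', ih]

theorem split₀_eq_pwords (s : List Char) : PySem.Chars.split₀ s = pwords s := by
  have := split₀_go_eq s [] []
  simpa [PySem.Chars.split₀] using this

-- a "word" : nonempty, no whitespace characters
def GoodWord (w : List Char) : Prop := w ≠ [] ∧ ∀ c ∈ w, PySem.Chars.isspace c = false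

theorem pwords_good (s : List Char) : ∀ w ∈ pwords s, GoodWord w := by
  induction s using pwords.induct with
  | case1 => intro w hw; simp [pwords] at hw
  | case2 c cs hc ih =>
    intro w hw
    rw [pwords, if_pos hc] at hw
    exact ih w hw
  | case3 c cs hc ih =>
    intro w hw
    rw [pwords, if_neg hc] at hw
    rcases List.mem_cons.mp hw with rfl | hw
    · refine ?_
      refine ⟨by simp, ?_⟩
      intro d hd
      rcases List.mem_cons.mp hd with rfl | hd
    -- head char c is non-space, tail chars come from takeWhile (!isspace)
      · simpa using hc
      · have := List.mem_takeWhile_imp hd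
        simpa using this
    · exact ih w hw

-- split() of a single-space join of good words gives the words back
theorem pwords_join (ws : List (List Char)) (h : ∀ w ∈ ws, GoodWord w) :
    pwords (List.intercalate [' '] ws) = ws := by
  induction ws with
  | nil => simp [List.intercalate, pwords]
  | cons w t ih =>
    have hw : GoodWord w := h w (by simp)
    obtain ⟨hne, hns⟩ := hw
    cases w with
    | nil => exact absurd rfl hne
    | cons c cs =>
      have hc : PySem.Chars.isspace c = false := hns c (by simp)
      have hcs : ∀ d ∈ cs, PySem.Chars.isspace d = false := fun d hd => hns d (by simp [hd])
      cases t with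
      | nil =>
        have h1 : List.intercalate ([' '] : List Char) [c :: cs] = c :: cs := by
          simp [List.intercalate]
        rw [h1, pwords, if_neg (by simp [hc])]
        have htw : cs.takeWhile (fun d => !PySem.Chars.isspace d) = cs :=
          List.takeWhile_eq_self_iff.mpr (by intro d hd; simp [hcs d hd])
        have hdw : cs.dropWhile (fun d => !PySem.Chars.isspace d) = [] :=
          List.dropWhile_eq_nil_iff.mpr (by intro d hd; simp [hcs d hd])
        simp [htw, hdw, pwords]
      | cons v t' =>
        have h1 : List.intercalate ([' '] : List Char) ((c :: cs) :: v :: t') =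
            (c :: cs) ++ [' '] ++ List.intercalate [' '] (v :: t') := by
          simp [List.intercalate, List.intersperse]
        rw [h1]
        have h2 : (c :: cs) ++ [' '] ++ List.intercalate [' '] (v :: t') =
            c :: (cs ++ (' ' :: List.intercalate [' '] (v :: t'))) := by simp
        rw [h2, pwords, if_neg (by simp [hc])]
        have hsp' : (!PySem.Chars.isspace ' ') = false := by decide
        have htw : (cs ++ (' ' :: List.intercalate [' '] (v :: t'))).takeWhile
            (fun d => !PySem.Chars.isspace d) = cs := by
          rw [List.takeWhile_append]
          have hself : cs.takeWhile (fun d => !PySem.Chars.isspace d) = cs :=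
            List.takeWhile_eq_self_iff.mpr (by intro d hd; simp [hcs d hd])
          rw [if_pos (by rw [hself])]
          simp [List.takeWhile_cons, hsp']
        have hdw : (cs ++ (' ' :: List.intercalate [' '] (v :: t'))).dropWhile
            (fun d => !PySem.Chars.isspace d) = ' ' :: List.intercalate [' '] (v :: t') := by
          rw [List.dropWhile_append]
          have hnil : cs.dropWhile (fun d => !PySem.Chars.isspace d) = [] :=
            List.dropWhile_eq_nil_iff.mpr (by intro d hd; simp [hcs d hd])
          rw [hnil]
          simp [List.dropWhile_cons, hsp']
        rw [htw, hdw]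
        have hsp : PySem.Chars.isspace ' ' = true := by decide
        rw [pwords, if_pos hsp, ih (fun w hw => h w (List.mem_cons_of_mem _ hw))]

-- every word of pwords s is an infix of s
theorem pwords_infix (s : List Char) : ∀ w ∈ pwords s, w <:+: s := by
  induction s using pwords.induct with
  | case1 => intro w hw; simp [pwords] at hw
  | case2 c cs hc ih =>
    intro w hw
    rw [pwords, if_pos hc] at hw
    exact (ih w hw).trans (List.infix_cons (List.infix_refl cs))
  | case3 c cs hc ih =>
    intro w hw
    rw [pwords, if_neg hc] at hw
    rcases List.mem_cons.mp hw with rfl | hw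
    · exact List.IsPrefix.isInfix ⟨cs.dropWhile (fun d => !PySem.Chars.isspace d), by
        simp [List.takeWhile_append_dropWhile]⟩
    · have h1 : w <:+: cs.dropWhile (fun d => !PySem.Chars.isspace d) := ih w hw
      have h2 : cs.dropWhile (fun d => !PySem.Chars.isspace d) <:+ cs :=
        List.dropWhile_suffix _
      exact (h1.trans h2.isInfix).trans (List.infix_cons (List.infix_refl cs))

-- decomposition of an infix of an append
theorem infix_append_cases {sub xs ys : List Char} (h : sub <:+: xs ++ ys) :
    sub <:+: xs ∨ sub <:+: ys ∨
      ∃ s1 s2, sub = s1 ++ s2 ∧ s1 ≠ [] ∧ s2 ≠ [] ∧ s1 <:+ xs ∧ s2 <+: ys := by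
  obtain ⟨t, u, htu⟩ := h
  have htu' : t ++ (sub ++ u) = xs ++ ys := by simpa [List.append_assoc] using htu
  rcases List.append_eq_append_iff.mp htu' with ⟨as, hxs, hsu⟩ | ⟨bs, ht, hys⟩
  · rcases List.append_eq_append_iff.mp hsu with ⟨bs, has, hu⟩ | ⟨cs, hsub, hys⟩
    · left
      exact ⟨t, bs, by rw [hxs, has]; simp⟩
    · by_cases hcs : cs = []
      · left
        subst hcs
        exact ⟨t, [], by rw [hxs, hsub]; simp⟩
      · by_cases has : as = []
        · right; left
          subst has
          simp at hsub
          exact ⟨[], u, by rw [hys, hsub]; simp⟩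
        · right; right
          exact ⟨as, cs, hsub, has, hcs, ⟨t, hxs.symm⟩, ⟨u, hys.symm⟩⟩
  · right; left
    exact ⟨bs, u, by rw [hys]; simp⟩

-- a whitespace-free nonempty pattern occurs in s iff it occurs in one of s's words
theorem infix_iff_word (sub : List Char) (hne : sub ≠ [])
    (hns : ∀ c ∈ sub, PySem.Chars.isspace c = false) (s : List Char) :
    sub <:+: s ↔ ∃ w ∈ pwords s, sub <:+: w := by
  constructor
  · intro h
    induction s using pwords.induct with
    | case1 =>
      exact absurd (List.eq_nil_of_infix_nil h) hne
    | case2 c cs hc ih =>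
      rw [pwords, if_pos hc]
      obtain ⟨t, u, htu⟩ := h
      cases t with
      | nil =>
        -- sub would start with the space c
        cases sub with
        | nil => exact absurd rfl hne
        | cons a as =>
          have : a = c := by simpa using congrArg (fun l => l.head?) htu
          subst this
          have := hns a (by simp)
          rw [hc] at this; cases this
      | cons x t' =>
        have hx : x = c ∧ t' ++ (sub ++ u) = cs := by simpa using htu
        exact ih ⟨t', u, by rw [List.append_assoc]; exact hx.2⟩
    | case3 c cs hc ih =>
      rw [pwords, if_neg hc]
      set w := c :: cs.takeWhile (fun d => !PySem.Chars.isspace d) with hwdef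
      set r := cs.dropWhile (fun d => !PySem.Chars.isspace d) with hrdef
      have hsplit : c :: cs = w ++ r := by
        simp [hwdef, hrdef, List.takeWhile_append_dropWhile]
      rw [hsplit] at h
      rcases infix_append_cases h with h1 | h1 | ⟨s1, s2, hsub, hs1, hs2, _, hpre⟩
      · exact ⟨w, by simp, h1⟩
      · obtain ⟨w', hw', hsw⟩ := ih h1
        exact ⟨w', by simp [hw'], hsw⟩
      · -- s2 is a nonempty prefix of r, so its head is a space char belonging to sub
        exfalso
        cases s2 with
        | nil => exact hs2 rfl
        | cons b bs =>
          cases hr : r with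
          | nil => rw [hr] at hpre; simp [List.prefix_nil] at hpre
          | cons d ds =>
            have hbd : b = d := by
              rw [hr] at hpre
              obtain ⟨v, hv⟩ := hpre
              simpa using congrArg (fun l => l.head?) hv
            have hd : PySem.Chars.isspace d = false := by
              have : b ∈ sub := by rw [hsub]; simp
              rw [hbd] at this; exact hns d this
            have : ¬ (!PySem.Chars.isspace d) = true := by
              have := List.head?_dropWhile_not (fun d => !PySem.Chars.isspace d) cs
              rw [← hrdef, hr] at this
              simpa using this
            simp [hd] at this
  · rintro ⟨w, hw, hsw⟩
    exact hsw.trans (pwords_infix s w hw)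

-- the six supertype strings, as both ports spell them
def supsList : List (List Char) :=
  [['B','a','s','i','c'], ['H','o','s','t'], ['L','e','g','e','n','d','a','r','y'],
   ['O','n','g','o','i','n','g'], ['S','n','o','w'], ['W','o','r','l','d']]

-- does any supertype occur (substring test) in the string s?
def anySup (s : List Char) : Bool := supsList.any (fun t => PySem.Chars.isIn t s)

theorem supsList_good : ∀ t ∈ supsList, t ≠ [] ∧ ∀ c ∈ t, PySem.Chars.isspace c = false := by
  intro t ht
  fin_cases ht <;> exact ⟨by simp, by intro c hc; fin_cases hc <;> rfl⟩

theorem anySup_iff_word (s : List Char) :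
    anySup s = true ↔ ∃ w ∈ pwords s, anySup w = true := by
  simp only [anySup, List.any_eq_true]
  constructor
  · rintro ⟨t, ht, hin⟩
    have hg := supsList_good t ht
    have := (infix_iff_word t hg.1 hg.2 s).mp ((PySem.Chars.isIn_iff_infix _ _).mp hin)
    obtain ⟨w, hw, hsw⟩ := this
    exact ⟨w, hw, t, ht, (PySem.Chars.isIn_iff_infix _ _).mpr hsw⟩
  · rintro ⟨w, hw, t, ht, hin⟩
    have hg := supsList_good t ht
    refine ⟨t, ht, (PySem.Chars.isIn_iff_infix _ _).mpr ?_⟩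
    exact ((PySem.Chars.isIn_iff_infix _ _).mp hin).trans (pwords_infix s w hw)

-- the word list shrinks by one each round of A's recursion
theorem getSuperTypeAux_dec (s : List Char) (h : anySup s = true) :
    (PySem.Chars.split₀ (PySem.Chars.join [' ']
        (PySem.List.slice (PySem.Chars.split₀ s) (some 1) none))).length <
      (PySem.Chars.split₀ s).length := by
  simp only [split₀_eq_pwords]
  obtain ⟨w, hw, -⟩ := (anySup_iff_word s).mp h
  cases hpw : pwords s with
  | nil => rw [hpw] at hw; cases hw
  | cons w0 t =>
    have hslice : PySem.List.slice (w0 :: t) (some 1) none = t := by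
      simp [pysem]
    rw [hslice]
    have hgood : ∀ u ∈ t, GoodWord u := by
      intro u hu
      exact pwords_good s u (by rw [hpw]; simp [hu])
    have : pwords (PySem.Chars.join [' '] t) = t := by
      rw [PySem.Chars.join]; exact pwords_join t hgood
    rw [this]
    simp

-- port of A: the recursion on (cardType, superType); `[0]`-indexing is `headD []`
-- (unreachable default: the split is nonempty whenever the guard holds)
def getSuperTypeAux (s acc : List Char) : List Char × List Char :=
  if h : anySup s = true then
    let ts := PySem.Chars.split₀ s
    getSuperTypeAux
      (PySem.Chars.join [' '] (PySem.List.slice ts (some 1) none))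
      (PySem.Chars.strip (acc ++ [' '] ++ ts.headD []))
  else (s, acc)
termination_by (PySem.Chars.split₀ s).length
decreasing_by exact getSuperTypeAux_dec s h

def getSuperType (cardType : String) (superType : String) : String × String :=
  let r := getSuperTypeAux cardType.toList superType.toList
  (String.ofList r.1, String.ofList r.2)

-- ===== PORT B =====
def getSuperType_alt (cardType : String) (superType : String) : String × String :=
  let ws := PySem.Chars.split₀ cardType.toList
  let last : Int := (PySem.List.enumerate ws).foldl
    (fun last iw => if anySup iw.2 then iw.1 else last) (-1)
  if last ≥ 0 then
    (String.ofList (PySem.Chars.join [' '] (PySem.List.slice ws (some (last + 1)) none)),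
     String.ofList (PySem.Chars.strip (superType.toList ++ [' '] ++
       PySem.Chars.join [' '] (PySem.List.slice ws none (some (last + 1))))))
  else (cardType, superType)

-- ===== PRECONDITION & SPEC =====
def Spec_getSuperType (cardType : String) (superType : String) (out : String × String) : Prop := out = getSuperType_alt cardType superType
instance (cardType : String) (superType : String) (out : String × String) : Decidable (Spec_getSuperType cardType superType out) := by unfold Spec_getSuperType; infer_instance

-- ===== CLAIM (what is proved, stated in full; the proofs are below) =====
def Claim_equal_getSuperType : Prop := ∀ (cardType : String) (superType : String), Dom_getSuperType cardType superType → Spec_getSuperType cardType superType (getSuperType cardType superType)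

-- ===== LEMMAS AND PROOFS =====

-- index of the last word containing a supertype, -1 if none (B's scan, structurally)
def lastIdx : List (List Char) → Int
  | [] => -1
  | w :: t =>
    let r := lastIdx t
    if r ≥ 0 then r + 1 else if anySup w then 0 else -1

theorem lastIdx_ge_neg_one (ws : List (List Char)) : -1 ≤ lastIdx ws := by
  induction ws with
  | nil => simp [lastIdx]
  | cons w t ih => simp only [lastIdx]; split_ifs <;> omega

theorem foldl_enumerate_lastIdx (ws : List (List Char)) : ∀ (k a : Int),
    (PySem.List.enumerate ws k).foldl (fun last iw => if anySup iw.2 then iw.1 else last) a =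
      if lastIdx ws ≥ 0 then k + lastIdx ws else a := by
  induction ws with
  | nil => intro k a; simp [PySem.List.enumerate, lastIdx]
  | cons w t ih =>
    intro k a
    rw [PySem.List.enumerate, List.foldl_cons, ih]
    have := lastIdx_ge_neg_one t
    simp only [lastIdx]
    split_ifs with h1 h2 h2 <;> try omega
    all_goals simp_all <;> omega

theorem lastIdx_nonneg_iff (ws : List (List Char)) :
    lastIdx ws ≥ 0 ↔ ∃ w ∈ ws, anySup w = true := by
  induction ws with
  | nil => simp [lastIdx]
  | cons w t ih =>
    have := lastIdx_ge_neg_one t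
    simp only [lastIdx, List.mem_cons]
    constructor
    · intro h
      split_ifs at h with h1 h2
      · obtain ⟨u, hu, hau⟩ := ih.mp h1; exact ⟨u, Or.inr hu, hau⟩
      · exact ⟨w, Or.inl rfl, h2⟩
      · omega
    · rintro ⟨u, hu | hu, hau⟩
      · subst hu; split_ifs <;> simp_all <;> omega
      · have : lastIdx t ≥ 0 := ih.mpr ⟨u, hu, hau⟩
        split_ifs <;> omega

-- strip facts
theorem rstrip_append_singleton (u : List Char) (c : Char)
    (hc : PySem.Chars.isspace c = false) :
    PySem.Chars.rstrip (u ++ [c]) = u ++ [c] := by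
  simp [PySem.Chars.rstrip, List.dropWhile, hc]

theorem strip_eq_lstrip (a w : List Char) (hne : w ≠ [])
    (hns : ∀ c ∈ w, PySem.Chars.isspace c = false) :
    PySem.Chars.strip (a ++ w) = PySem.Chars.lstrip (a ++ w) := by
  obtain ⟨u, c, rfl⟩ := w.eq_nil_or_concat.resolve_left hne
  have hc : PySem.Chars.isspace c = false := hns c (by simp)
  simp only [List.concat_eq_append] at hns ⊢
  rw [PySem.Chars.strip]
  -- lstrip (a ++ u ++ [c]) still ends with the non-space c (or is that very list)
  have hsuff : PySem.Chars.lstrip (a ++ (u ++ [c])) <:+ a ++ (u ++ [c]) :=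
    List.dropWhile_suffix _
  obtain ⟨p, hp⟩ := hsuff
  cases hv : PySem.Chars.lstrip (a ++ (u ++ [c])) with
  | nil =>
    have : ∀ x ∈ a ++ (u ++ [c]), PySem.Chars.isspace x = true := by
      have := List.dropWhile_eq_nil_iff.mp hv
      simpa [PySem.Chars.lstrip] using this
    have := this c (by simp)
    rw [hc] at this; cases this
  | cons x xs =>
    rw [hv] at hp
    -- x :: xs is a nonempty suffix of a list ending in [c], so it ends in c
    have hgl : (x :: xs).getLast? = some c := by
      have h1 := congrArg List.getLast? hp
      simpa using h1
    obtain ⟨ys, e, hys⟩ := (x :: xs).eq_nil_or_concat.resolve_left (by simp)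
    simp only [List.concat_eq_append] at hys
    rw [hys] at hgl
    simp at hgl
    rw [hys, hgl, rstrip_append_singleton _ _ hc]

theorem strip_lstrip_append (y z : List Char) :
    PySem.Chars.strip (PySem.Chars.lstrip y ++ z) = PySem.Chars.strip (y ++ z) := by
  have : PySem.Chars.lstrip (PySem.Chars.lstrip y ++ z) = PySem.Chars.lstrip (y ++ z) := by
    simp only [PySem.Chars.lstrip, List.dropWhile_append]
    rw [List.dropWhile_idempotent]
  rw [PySem.Chars.strip, PySem.Chars.strip, this]

-- single-space join of a cons with nonempty tail
theorem join_cons_ne (w : List Char) (l : List (List Char)) (hl : l ≠ []) :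
    PySem.Chars.join [' '] (w :: l) = w ++ ' ' :: PySem.Chars.join [' '] l := by
  cases l with
  | nil => exact absurd rfl hl
  | cons v t => simp [PySem.Chars.join, List.intercalate, List.intersperse]

theorem join_singleton' (w : List Char) : PySem.Chars.join [' '] [w] = w := by
  simp [PySem.Chars.join, List.intercalate]

-- the main induction: A's recursion from any string whose word list is ws
theorem aux_eq (ws : List (List Char)) (hgood : ∀ w ∈ ws, GoodWord w) :
    ∀ (s acc : List Char), pwords s = ws →
      getSuperTypeAux s acc =
        (if lastIdx ws ≥ 0 then
          (PySem.Chars.join [' '] (ws.drop (lastIdx ws + 1).toNat),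
           PySem.Chars.strip (acc ++ [' '] ++
             PySem.Chars.join [' '] (ws.take (lastIdx ws + 1).toNat)))
        else (s, acc)) := by
  induction ws with
  | nil =>
    intro s acc hs
    have hcond : anySup s = false := by
      rw [← Bool.not_eq_true]
      intro h
      obtain ⟨w, hw, -⟩ := (anySup_iff_word s).mp h
      rw [hs] at hw; cases hw
    rw [getSuperTypeAux, dif_neg (by simp [hcond])]
    simp [lastIdx]
  | cons w t ih =>
    intro s acc hs
    have hw : GoodWord w := hgood w (by simp)
    have hgt : ∀ u ∈ t, GoodWord u := fun u hu => hgood u (by simp [hu])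
    by_cases hcond : anySup s = true
    · -- some word matches; A peels off w and recurses
      have hlast : lastIdx (w :: t) ≥ 0 := by
        rw [lastIdx_nonneg_iff]
        obtain ⟨u, hu, hau⟩ := (anySup_iff_word s).mp hcond
        exact ⟨u, by rwa [hs] at hu, hau⟩
      rw [getSuperTypeAux, dif_pos hcond]
      have hsw : PySem.Chars.split₀ s = w :: t := by rw [split₀_eq_pwords, hs]
      have hslice : PySem.List.slice (w :: t) (some 1) none = t := by simp [pysem]
      have hjoin : pwords (PySem.Chars.join [' '] t) = t := by
        rw [PySem.Chars.join, pwords_join t hgt]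
      rw [hsw]
      simp only [hslice, List.headD_cons]
      rw [ih hgt _ _ hjoin]
      have htge := lastIdx_ge_neg_one t
      by_cases hrt : lastIdx t ≥ 0
      · -- the last match is in t
        have h1 : lastIdx (w :: t) = lastIdx t + 1 := by
          simp only [lastIdx]; rw [if_pos hrt]
        rw [if_pos hrt, if_pos hlast, h1]
        have htne : t ≠ [] := by rintro rfl; simp [lastIdx] at hrt
        have htake_ne : t.take (lastIdx t + 1).toNat ≠ [] := by
          have hk : (lastIdx t + 1).toNat = (lastIdx t).toNat + 1 := by omega
          cases t with
          | nil => exact absurd rfl htne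
          | cons v t' => rw [hk, List.take_succ_cons]; simp
        congr 1
        · -- dropped parts agree
          congr 1
          have : (lastIdx t + 1 + 1).toNat = (lastIdx t + 1).toNat + 1 := by omega
          rw [this, List.drop_succ_cons]
        · -- accumulated supertype strings agree
          have : (lastIdx t + 1 + 1).toNat = (lastIdx t + 1).toNat + 1 := by omega
          rw [this, List.take_succ_cons, join_cons_ne w _ htake_ne]
          -- strip (strip (acc ++ ' ' ++ w) ++ ' ' ++ X) = strip (acc ++ ' ' ++ (w ++ ' ' :: X))
          rw [strip_eq_lstrip (acc ++ [' ']) w hw.1 hw.2]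
          have h2 : PySem.Chars.lstrip ((acc ++ [' ']) ++ w) ++ [' '] ++
              PySem.Chars.join [' '] (t.take (lastIdx t + 1).toNat) =
              PySem.Chars.lstrip ((acc ++ [' ']) ++ w) ++ ([' '] ++
              PySem.Chars.join [' '] (t.take (lastIdx t + 1).toNat)) := by simp
          rw [h2, strip_lstrip_append]
          congr 1
          simp
      · -- the last match is w itself
        have h1 : lastIdx (w :: t) = 0 := by
          simp only [lastIdx]
          rw [if_neg hrt, if_pos]
          rw [lastIdx_nonneg_iff] at hlast hrt
          obtain ⟨u, hu, hau⟩ := hlast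
          rcases List.mem_cons.mp hu with rfl | hu
          · exact hau
          · exact absurd ⟨u, hu, hau⟩ hrt
        rw [if_neg hrt, if_pos hlast, h1]
        have h2 : ((0 : Int) + 1).toNat = 1 := by norm_num
        rw [h2]
        simp [join_singleton']
    · -- no word matches anywhere
      have hlast : ¬ lastIdx (w :: t) ≥ 0 := by
        rw [lastIdx_nonneg_iff]
        rintro ⟨u, hu, hau⟩
        exact absurd ((anySup_iff_word s).mpr ⟨u, by rwa [hs], hau⟩) hcond
      rw [getSuperTypeAux, dif_neg hcond, if_neg hlast]

-- ===== VERDICT (by name: the statement is the Claim_ definition above) =====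
theorem getSuperType_spec : Claim_equal_getSuperType := by
  intro cardType superType _
  unfold Spec_getSuperType
  simp only [getSuperType, getSuperType_alt]
  set ws := PySem.Chars.split₀ cardType.toList with hws
  have hgood : ∀ w ∈ ws, GoodWord w := by
    rw [hws, split₀_eq_pwords]; exact pwords_good _
  have hpw : pwords cardType.toList = ws := by rw [hws, split₀_eq_pwords]
  rw [aux_eq ws hgood cardType.toList superType.toList hpw]
  have hfold : (PySem.List.enumerate ws).foldl
      (fun last iw => if anySup iw.2 then iw.1 else last) (-1) =
      if lastIdx ws ≥ 0 then lastIdx ws else -1 := by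
    have := foldl_enumerate_lastIdx ws 0 (-1)
    simpa using this
  rw [hfold]
  by_cases h : lastIdx ws ≥ 0
  · rw [if_pos h]
    have hcast : lastIdx ws + 1 = ((lastIdx ws + 1).toNat : Int) := by omega
    have hslice1 : PySem.List.slice ws (some (lastIdx ws + 1)) none =
        ws.drop (lastIdx ws + 1).toNat := by
      rw [hcast]; simp [pysem]
    have hslice2 : PySem.List.slice ws none (some (lastIdx ws + 1)) =
        ws.take (lastIdx ws + 1).toNat := by
      rw [hcast]; simp [pysem]
    rw [if_pos h, hslice1, hslice2]
    rw [if_pos h]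
  · rw [if_neg h, if_neg h]
    simp [String.ofList_toList]
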